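-- pv_equiv track=rewrite | github.com/senthilthepro/universal-tester | src/universal_tester/detectors/kotlin_import_detector.py | get_contextual_imports
-- ===== SOURCE A (Python) =====
-- from typing import List, Dict, Any
--
-- def get_contextual_imports(kotlin_code: str, class_name: str = None) -> List[str]:
--     """Get imports with additional context-based filtering for Kotlin"""
--     contextual_imports = []
--
--     # Base testing imports for Kotlin
--     if any(keyword in kotlin_code.lower() for keyword in ['test', '@test']):
--         contextual_imports.extend([
--             'org.junit.jupiter.api.Test',
--             'org.junit.jupiter.api.BeforeEach',
--             'org.junit.jupiter.api.Assertions.*',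
--             'io.mockk.*'
--         ])
--
--     # Coroutines context
--     if any(keyword in kotlin_code for keyword in ['suspend', 'launch', 'async']):
--         contextual_imports.extend([
--             'kotlinx.coroutines.*',
--             'kotlinx.coroutines.test.*'
--         ])
--
--     # Spring context
--     if any(annotation in kotlin_code for annotation in ['@Service', '@Repository', '@Controller']):
--         contextual_imports.extend([
--             'org.springframework.stereotype.*',
--             'org.springframework.beans.factory.annotation.*'
--         ])
--
--     # Data class context
--     if 'data class' in kotlin_code:
--         contextual_imports.extend([
--             # Data classes typically work without additional imports
--             # but might need serialization imports
--         ])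
--
--     # Class name based context
--     if class_name:
--         class_lower = class_name.lower()
--
--         if 'service' in class_lower:
--             contextual_imports.extend([
--                 'org.springframework.stereotype.Service',
--             ])
--
--         elif 'repository' in class_lower:
--             contextual_imports.extend([
--                 'org.springframework.stereotype.Repository',
--                 'org.springframework.data.jpa.repository.*'
--             ])
--
--         elif 'controller' in class_lower:
--             contextual_imports.extend([
--                 'org.springframework.web.bind.annotation.*',
--                 'org.springframework.http.*'
--             ])
--
--         elif 'test' in class_lower:
--             contextual_imports.extend([
--                 'org.junit.jupiter.api.*',
--                 'io.mockk.*',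
--                 'kotlinx.coroutines.test.*'
--             ])
--
--     # Remove duplicates and sort
--     return sorted(list(set(contextual_imports)))
-- ===== SOURCE B (Python) =====
-- from typing import List
--
-- def get_contextual_imports(kotlin_code: str, class_name: str = None) -> List[str]:
--     # Inverted formulation: compute trigger flags once, then emit each entry of a
--     # pre-sorted, duplicate-free catalog of all possible imports whose condition holds.
--     low = kotlin_code.lower()
--     t = any(k in low for k in ('test', '@test'))
--     co = any(k in kotlin_code for k in ('suspend', 'launch', 'async'))
--     sp = any(a in kotlin_code for a in ('@Service', '@Repository', '@Controller'))
--     cm = None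
--     if class_name:
--         cl = class_name.lower()
--         cm = next((k for k in ('service', 'repository', 'controller', 'test') if k in cl), None)
--     catalog = [
--         ('io.mockk.*', t or cm == 'test'),
--         ('kotlinx.coroutines.*', co),
--         ('kotlinx.coroutines.test.*', co or cm == 'test'),
--         ('org.junit.jupiter.api.*', cm == 'test'),
--         ('org.junit.jupiter.api.Assertions.*', t),
--         ('org.junit.jupiter.api.BeforeEach', t),
--         ('org.junit.jupiter.api.Test', t),
--         ('org.springframework.beans.factory.annotation.*', sp),
--         ('org.springframework.data.jpa.repository.*', cm == 'repository'),
--         ('org.springframework.http.*', cm == 'controller'),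
--         ('org.springframework.stereotype.*', sp),
--         ('org.springframework.stereotype.Repository', cm == 'repository'),
--         ('org.springframework.stereotype.Service', cm == 'service'),
--         ('org.springframework.web.bind.annotation.*', cm == 'controller'),
--     ]
--     return [imp for imp, on in catalog if on]
-- ===== Notes on version B (the rewrite author's own statement) =====
-- stated objective: simpler
-- what changed: B inverts the computation: instead of matching rules and collecting imports into a list to dedup and sort, it computes four trigger flags once (test/coroutines/spring keywords and the first-matching class-name category) and filters a single pre-sorted duplicate-free catalog of all 14 possible imports by each import's trigger condition, so no set, dedup or sort happens at runtime.
import Mathlib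
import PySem

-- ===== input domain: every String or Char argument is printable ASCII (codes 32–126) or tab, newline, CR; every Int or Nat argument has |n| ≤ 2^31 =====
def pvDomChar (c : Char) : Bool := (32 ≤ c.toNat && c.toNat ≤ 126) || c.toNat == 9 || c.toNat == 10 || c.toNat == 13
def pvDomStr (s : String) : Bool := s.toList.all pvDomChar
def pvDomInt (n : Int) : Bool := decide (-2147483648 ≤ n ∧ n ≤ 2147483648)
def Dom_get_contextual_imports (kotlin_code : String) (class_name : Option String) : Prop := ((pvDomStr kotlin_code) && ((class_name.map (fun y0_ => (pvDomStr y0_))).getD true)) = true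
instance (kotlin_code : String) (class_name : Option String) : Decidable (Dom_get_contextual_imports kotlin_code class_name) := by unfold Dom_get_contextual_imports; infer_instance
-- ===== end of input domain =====

-- B inverts A's rule-matching: it computes trigger flags once and filters a pre-sorted duplicate-free catalog of all possible imports, so no set/dedup/sort happens at runtime (objective: simpler).


-- ===== PORT A =====
def get_contextual_imports (kotlin_code : String) (class_name : Option String) : List String :=
  let ci : List String := []
  let ci := if (["test", "@test"] : List String).any
      (fun kw => PySem.Str.isIn kw (PySem.Str.lower kotlin_code)) then
      ci ++ ["org.junit.jupiter.api.Test", "org.junit.jupiter.api.BeforeEach",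
             "org.junit.jupiter.api.Assertions.*", "io.mockk.*"]
    else ci
  let ci := if (["suspend", "launch", "async"] : List String).any
      (fun kw => PySem.Str.isIn kw kotlin_code) then
      ci ++ ["kotlinx.coroutines.*", "kotlinx.coroutines.test.*"]
    else ci
  let ci := if (["@Service", "@Repository", "@Controller"] : List String).any
      (fun an => PySem.Str.isIn an kotlin_code) then
      ci ++ ["org.springframework.stereotype.*", "org.springframework.beans.factory.annotation.*"]
    else ci
  let ci := if PySem.Str.isIn "data class" kotlin_code then ci ++ [] else ci
  let ci :=
    match class_name with
    | none => ci
    | some cn =>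
      if cn = "" then ci
      else
        let class_lower := PySem.Str.lower cn
        if PySem.Str.isIn "service" class_lower then
          ci ++ ["org.springframework.stereotype.Service"]
        else if PySem.Str.isIn "repository" class_lower then
          ci ++ ["org.springframework.stereotype.Repository", "org.springframework.data.jpa.repository.*"]
        else if PySem.Str.isIn "controller" class_lower then
          ci ++ ["org.springframework.web.bind.annotation.*", "org.springframework.http.*"]
        else if PySem.Str.isIn "test" class_lower then
          ci ++ ["org.junit.jupiter.api.*", "io.mockk.*", "kotlinx.coroutines.test.*"]
        else ci
  PySem.List.sorted (PySem.Set.ofList ci) (fun x => x) false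

-- ===== PORT B =====
def get_contextual_imports_alt (kotlin_code : String) (class_name : Option String) : List String :=
  let low := PySem.Str.lower kotlin_code
  let t := (["test", "@test"] : List String).any (fun k => PySem.Str.isIn k low)
  let co := (["suspend", "launch", "async"] : List String).any (fun k => PySem.Str.isIn k kotlin_code)
  let sp := (["@Service", "@Repository", "@Controller"] : List String).any (fun a => PySem.Str.isIn a kotlin_code)
  let cm : Option String :=
    match class_name with
    | none => none
    | some cn =>
      if cn = "" then none
      else
        let cl := PySem.Str.lower cn
        (["service", "repository", "controller", "test"] : List String).find?
          (fun k => PySem.Str.isIn k cl)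
  let catalog : List (String × Bool) :=
    [ ("io.mockk.*", t || cm == some "test"),
      ("kotlinx.coroutines.*", co),
      ("kotlinx.coroutines.test.*", co || cm == some "test"),
      ("org.junit.jupiter.api.*", cm == some "test"),
      ("org.junit.jupiter.api.Assertions.*", t),
      ("org.junit.jupiter.api.BeforeEach", t),
      ("org.junit.jupiter.api.Test", t),
      ("org.springframework.beans.factory.annotation.*", sp),
      ("org.springframework.data.jpa.repository.*", cm == some "repository"),
      ("org.springframework.http.*", cm == some "controller"),
      ("org.springframework.stereotype.*", sp),
      ("org.springframework.stereotype.Repository", cm == some "repository"),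
      ("org.springframework.stereotype.Service", cm == some "service"),
      ("org.springframework.web.bind.annotation.*", cm == some "controller") ]
  (catalog.filter (fun p => p.2)).map (fun p => p.1)

-- ===== PRECONDITION & SPEC =====
def Spec_get_contextual_imports (kotlin_code : String) (class_name : Option String) (out : List String) : Prop := out = get_contextual_imports_alt kotlin_code class_name
instance (kotlin_code : String) (class_name : Option String) (out : List String) : Decidable (Spec_get_contextual_imports kotlin_code class_name out) := by unfold Spec_get_contextual_imports; infer_instance

-- ===== CLAIM (what is proved, stated in full; the proofs are below) =====
def Claim_equal_get_contextual_imports : Prop := ∀ (kotlin_code : String) (class_name : Option String), Dom_get_contextual_imports kotlin_code class_name → Spec_get_contextual_imports kotlin_code class_name (get_contextual_imports kotlin_code class_name)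

-- ===== LEMMAS AND PROOFS =====

-- ===== VERDICT (by name: the statement is the Claim_ definition above) =====
set_option maxHeartbeats 4000000 in
theorem get_contextual_imports_spec : Claim_equal_get_contextual_imports := by
  intro code cn _
  unfold Spec_get_contextual_imports
  rw [get_contextual_imports.eq_def, get_contextual_imports_alt.eq_def]
  cases h1 : (["test", "@test"] : List String).any (fun kw => PySem.Str.isIn kw (PySem.Str.lower code)) <;>
  cases h2 : (["suspend", "launch", "async"] : List String).any (fun kw => PySem.Str.isIn kw code) <;>
  cases h3 : (["@Service", "@Repository", "@Controller"] : List String).any (fun an => PySem.Str.isIn an code) <;>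
  simp only [h1, h2, h3, Bool.false_eq_true, reduceIte, List.append_nil, ite_self] <;>
  (cases cn with
   | none =>
      exact PySem.List.sorted_id_eq_of_perm_of_pairwise _ _ (by decide)
        (by (try simp only [String.le_iff_toList_le]); decide)
   | some s =>
      by_cases he : s = ""
      · simp only [he, reduceIte]
        exact PySem.List.sorted_id_eq_of_perm_of_pairwise _ _ (by decide)
          (by (try simp only [String.le_iff_toList_le]); decide)
      · simp only [he, reduceIte, List.find?]
        cases k1 : PySem.Str.isIn "service" (PySem.Str.lower s) <;>
        cases k2 : PySem.Str.isIn "repository" (PySem.Str.lower s) <;>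
        cases k3 : PySem.Str.isIn "controller" (PySem.Str.lower s) <;>
        cases k4 : PySem.Str.isIn "test" (PySem.Str.lower s) <;>
        simp only [k1, k2, k3, k4, Bool.false_eq_true, reduceIte] <;>
        exact PySem.List.sorted_id_eq_of_perm_of_pairwise _ _ (by decide)
          (by (try simp only [String.le_iff_toList_le]); decide))
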